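-- pv_equiv track=rewrite | github.com/Ciriera/Optimization_Planner | app/algorithms/genetic_local_search.py | _repair_duplicates_genetic_local_search
-- ===== SOURCE A (Python) =====
-- def _repair_duplicates_genetic_local_search(assignments):
--     """Genetic Local Search-specific duplicate repair"""
--     from collections import defaultdict
--
--     # Group by project_id and keep the best assignment
--     project_assignments = defaultdict(list)
--     for assignment in assignments:
--         project_id = assignment.get("project_id")
--         if project_id:
--             project_assignments[project_id].append(assignment)
--
--     # For each project, choose the best assignment
--     repaired = []
--     for project_id, project_list in project_assignments.items():
--         if len(project_list) == 1:
--             repaired.append(project_list[0])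
--         else:
--             # Choose the assignment with earliest timeslot
--             best_assignment = min(project_list, key=lambda x: x.get("timeslot_id", ""))
--             repaired.append(best_assignment)
--
--     return repaired
-- ===== SOURCE B (Python) =====
-- def _repair_duplicates_genetic_local_search(assignments):
--     """Single online pass: keep the best (earliest-timeslot) assignment per project."""
--     best = {}
--     for assignment in assignments:
--         project_id = assignment.get("project_id")
--         if not project_id:
--             continue
--         current = best.get(project_id)
--         if current is None:
--             best[project_id] = assignment
--         elif assignment.get("timeslot_id", "") < current.get("timeslot_id", ""):
--             best[project_id] = assignment
--     return list(best.values())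
-- ===== Notes on version B (the rewrite author's own statement) =====
-- stated objective: simpler
-- what changed: Replaces A's two shaped passes (defaultdict of per-project lists, then a separate min-reduction per project) by one online fold keeping only the current best assignment per project in a dict, returning its values.
import Mathlib
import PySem

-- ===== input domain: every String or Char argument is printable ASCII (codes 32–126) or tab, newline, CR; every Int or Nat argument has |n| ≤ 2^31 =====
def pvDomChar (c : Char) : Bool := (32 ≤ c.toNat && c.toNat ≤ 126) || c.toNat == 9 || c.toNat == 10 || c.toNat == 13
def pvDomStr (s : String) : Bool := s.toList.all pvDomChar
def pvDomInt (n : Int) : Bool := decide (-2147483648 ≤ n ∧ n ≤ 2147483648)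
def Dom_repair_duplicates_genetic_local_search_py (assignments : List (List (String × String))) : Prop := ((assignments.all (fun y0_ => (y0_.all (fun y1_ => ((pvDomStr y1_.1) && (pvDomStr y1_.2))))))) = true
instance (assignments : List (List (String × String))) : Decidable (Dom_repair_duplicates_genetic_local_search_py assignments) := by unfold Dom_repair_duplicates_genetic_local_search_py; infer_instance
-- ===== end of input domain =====

-- B replaces A's two shaped passes (group into per-project lists, then min-reduce each list)
-- by a single online fold keeping the current best assignment per project (objective: simpler).

-- ===== PORT A =====

-- assignment.get(k) on the association-list encoding of a Python dict (first match)
def pvGet (a : List (String × String)) (k : String) : Option String :=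
  (a.find? (fun p => p.1 == k)).map (·.2)

-- lambda x: x.get("timeslot_id", "")
def pvTs (a : List (String × String)) : String :=
  (pvGet a "timeslot_id").getD ""

def repair_duplicates_genetic_local_search_py (assignments : List (List (String × String))) : List (List (String × String)) :=
  -- group by project_id (truthiness filter: key present AND non-empty)
  let project_assignments : PySem.Dict String (List (List (String × String))) :=
    assignments.foldl (fun d assignment =>
      match pvGet assignment "project_id" with
      | none => d
      | some project_id =>
          if project_id = "" then d else d.modify project_id [] (· ++ [assignment]))
      PySem.Dict.empty
  -- for each project, choose the best assignment
  project_assignments.items.foldl (fun repaired kv =>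
    if kv.2.length = 1 then repaired ++ [kv.2.headI]
    else
      match PySem.List.min? kv.2 pvTs with
      | none => repaired              -- unreachable: grouped lists are nonempty
      | some best_assignment => repaired ++ [best_assignment]) []

-- ===== PORT B =====

def repair_duplicates_genetic_local_search_py_alt (assignments : List (List (String × String))) : List (List (String × String)) :=
  (assignments.foldl (fun best assignment =>
    match pvGet assignment "project_id" with
    | none => best
    | some project_id =>
        if project_id = "" then best
        else
          match best.get? project_id with
          | none => best.insert project_id assignment
          | some current =>
              if pvTs assignment < pvTs current then best.insert project_id assignment
              else best)
    PySem.Dict.empty).values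

-- ===== PRECONDITION & SPEC =====
def Spec_repair_duplicates_genetic_local_search_py (assignments : List (List (String × String))) (out : List (List (String × String))) : Prop := out = repair_duplicates_genetic_local_search_py_alt assignments
instance (assignments : List (List (String × String))) (out : List (List (String × String))) : Decidable (Spec_repair_duplicates_genetic_local_search_py assignments out) := by unfold Spec_repair_duplicates_genetic_local_search_py; infer_instance

-- ===== CLAIM (what is proved, stated in full; the proofs are below) =====
def Claim_equal_repair_duplicates_genetic_local_search_py : Prop := ∀ (assignments : List (List (String × String))), Dom_repair_duplicates_genetic_local_search_py assignments → Spec_repair_duplicates_genetic_local_search_py assignments (repair_duplicates_genetic_local_search_py assignments)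

-- ===== LEMMAS AND PROOFS =====

-- the value B stores for a group: the first min of the group by timeslot key
def pvMF (pl : List (List (String × String))) : List (String × String) :=
  (PySem.List.min? pl pvTs).getD []

def pvF (kv : String × List (List (String × String))) : String × List (String × String) :=
  (kv.1, pvMF kv.2)

-- the one-step online-min update (the body of PySem.List.min?'s fold)
def pvMinStep (acc : Option (List (String × String))) (x : List (String × String)) :
    Option (List (String × String)) :=
  match acc with
  | none => some x
  | some m => if pvTs x < pvTs m then some x else some m

theorem pvMin?_eq_foldl (pl : List (List (String × String))) :
    PySem.List.min? pl pvTs = pl.foldl pvMinStep none := by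
  unfold PySem.List.min?
  congr 1
  funext acc x
  cases acc <;> rfl

theorem pvMin?_append_singleton (pl : List (List (String × String))) (a : List (String × String)) :
    PySem.List.min? (pl ++ [a]) pvTs = pvMinStep (PySem.List.min? pl pvTs) a := by
  rw [pvMin?_eq_foldl, pvMin?_eq_foldl, List.foldl_append, List.foldl_cons, List.foldl_nil]

-- A's grouping loop body / B's loop body, named for the induction
def pvStepA (d : PySem.Dict String (List (List (String × String)))) (a : List (String × String)) :
    PySem.Dict String (List (List (String × String))) :=
  match pvGet a "project_id" with
  | none => d
  | some pid => if pid = "" then d else d.modify pid [] (· ++ [a])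

def pvStepB (d : PySem.Dict String (List (String × String))) (a : List (String × String)) :
    PySem.Dict String (List (String × String)) :=
  match pvGet a "project_id" with
  | none => d
  | some pid =>
      if pid = "" then d
      else
        match d.get? pid with
        | none => d.insert pid a
        | some cur => if pvTs a < pvTs cur then d.insert pid a else d

theorem pvGet?_map_F (g : PySem.Dict String (List (List (String × String)))) (k : String) :
    (PySem.Dict.mk (g.items.map pvF)).get? k = (g.get? k).map pvMF := by
  simp only [PySem.Dict.get?, List.find?_map]
  have : ((fun p : String × List (String × String) => p.1 == k) ∘ pvF)
       = (fun p : String × List (List (String × String)) => p.1 == k) := by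
    funext p; rfl
  rw [this]
  cases g.1.find? (fun p => p.1 == k) <;> rfl

-- the invariant of the two loops
def pvInv (g : PySem.Dict String (List (List (String × String))))
    (b : PySem.Dict String (List (String × String))) : Prop :=
  g.keys.Nodup ∧ (∀ kv ∈ g.items, kv.2 ≠ []) ∧ b.items = g.items.map pvF

theorem pvInv_step (g : PySem.Dict String (List (List (String × String))))
    (b : PySem.Dict String (List (String × String))) (a : List (String × String))
    (h : pvInv g b) : pvInv (pvStepA g a) (pvStepB b a) := by
  obtain ⟨hnd, hne, hitems⟩ := h
  have hbmk : b = PySem.Dict.mk (g.items.map pvF) := PySem.Dict.ext hitems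
  unfold pvStepA pvStepB
  cases hp : pvGet a "project_id" with
  | none => exact ⟨hnd, hne, hitems⟩
  | some pid =>
    by_cases hpe : pid = ""
    · simp only [hpe, if_true]; exact ⟨hnd, hne, hitems⟩
    · simp only [if_neg hpe]
      have hget : b.get? pid = (g.get? pid).map pvMF := by
        rw [hbmk]; exact pvGet?_map_F g pid
      cases hg : g.get? pid with
      | none =>
        have hb : b.get? pid = none := by rw [hget, hg]; rfl
        have hcg : g.contains pid = false := by
          rw [PySem.Dict.contains_eq_isSome_get?, hg]; rfl
        have hcb : b.contains pid = false := by
          rw [PySem.Dict.contains_eq_isSome_get?, hb]; rfl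
        simp only [hb]
        have hmod : g.modify pid [] (· ++ [a]) = g.insert pid [a] := by
          unfold PySem.Dict.modify
          rw [PySem.Dict.getD_of_get?_eq_none g [] hg]
          rfl
        rw [hmod]
        refine ⟨?_, ?_, ?_⟩
        · rw [PySem.Dict.keys_insert_of_not_contains g [a] hcg]
          have hnm : pid ∉ g.keys := (PySem.Dict.get?_eq_none_iff_not_mem_keys g pid).1 hg
          rw [List.nodup_append]
          exact ⟨hnd, List.nodup_singleton pid, fun x hx b hb => by
            rw [List.mem_singleton] at hb; subst hb; exact fun hxp => hnm (hxp ▸ hx)⟩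
        · intro kv hkv
          rw [PySem.Dict.items_insert_of_not_contains g [a] hcg, List.mem_append] at hkv
          cases hkv with
          | inl hin => exact hne kv hin
          | inr hin =>
            rw [List.mem_singleton] at hin; subst hin; simp
        · rw [PySem.Dict.items_insert_of_not_contains g [a] hcg,
              PySem.Dict.items_insert_of_not_contains b a hcb, hitems, List.map_append]
          rfl
      | some pl =>
        have hb : b.get? pid = some (pvMF pl) := by rw [hget, hg]; rfl
        have hcg : g.contains pid = true := by
          rw [PySem.Dict.contains_eq_isSome_get?, hg]; rfl
        have hcb : b.contains pid = true := by
          rw [PySem.Dict.contains_eq_isSome_get?, hb]; rfl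
        simp only [hb]
        have hmod : g.modify pid [] (· ++ [a]) = g.insert pid (pl ++ [a]) := by
          unfold PySem.Dict.modify
          rw [PySem.Dict.getD_of_get?_eq_some g [] hg]
        rw [hmod]
        -- the key fact: the first element of g.items with key pid carries pl,
        -- and by Nodup it is the only one
        have hkey : ∀ kv ∈ g.items, kv.1 = pid → kv.2 = pl := by
          intro kv hkv hk1
          have h1 : g.get? kv.1 = some kv.2 :=
            PySem.Dict.get?_of_mem_items g (k := kv.1) (v := kv.2) (by simpa using hkv) hnd
          rw [hk1, hg] at h1
          exact (Option.some_inj.mp h1).symm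
        have hndk : (g.insert pid (pl ++ [a])).keys.Nodup := by
          rw [PySem.Dict.keys_insert_of_contains g (pl ++ [a]) hcg]; exact hnd
        have hnek : ∀ kv ∈ (g.insert pid (pl ++ [a])).items, kv.2 ≠ [] := by
          intro kv hkv
          rw [PySem.Dict.items_insert_of_contains g (pl ++ [a]) hcg] at hkv
          obtain ⟨kv0, hkv0, hmapped⟩ := List.mem_map.1 hkv
          by_cases hk : (kv0.1 == pid) = true
          · rw [if_pos hk] at hmapped; subst hmapped; simp
          · rw [if_neg hk] at hmapped; subst hmapped; exact hne kv0 hkv0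
        have hnew : pvMF (pl ++ [a]) = if pvTs a < pvTs (pvMF pl) then a else pvMF pl := by
          unfold pvMF
          rw [pvMin?_append_singleton]
          cases hm : PySem.List.min? pl pvTs with
          | none =>
            exfalso
            have : pl = [] := (PySem.List.min?_eq_none_iff (xs := pl) (key := pvTs)).1 hm
            exact hne (pid, pl) (PySem.Dict.mem_items_of_get?_eq_some g hg) (by simpa using this)
          | some m =>
            by_cases hlt : pvTs a < pvTs m
            · simp [pvMinStep, hlt]
            · simp [pvMinStep, hlt]
        have hitems' : ∀ (v : List (String × String)),
            (b.insert pid v).items = g.items.map (fun kv => if (kv.1 == pid) = true then (pid, v) else pvF kv) := by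
          intro v
          rw [PySem.Dict.items_insert_of_contains b v hcb, hitems, List.map_map]
          apply List.map_congr_left
          intro kv _
          by_cases hk : kv.1 = pid
          · simp [pvF, hk]
          · simp [pvF, hk]
        have hitemsA : (g.insert pid (pl ++ [a])).items.map pvF
            = g.items.map (fun kv => if (kv.1 == pid) = true then (pid, pvMF (pl ++ [a])) else pvF kv) := by
          rw [PySem.Dict.items_insert_of_contains g (pl ++ [a]) hcg, List.map_map]
          apply List.map_congr_left
          intro kv _
          by_cases hk : kv.1 = pid
          · simp [pvF, hk]
          · simp [pvF, hk]
        by_cases hlt : pvTs a < pvTs (pvMF pl)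
        · rw [if_pos hlt]
          refine ⟨hndk, hnek, ?_⟩
          rw [hitems' a, hitemsA]
          apply List.map_congr_left
          intro kv _
          by_cases hk : kv.1 = pid
          · simp [hk, hnew, hlt]
          · simp [hk]
        · rw [if_neg hlt]
          refine ⟨hndk, hnek, ?_⟩
          rw [hitems, hitemsA]
          apply List.map_congr_left
          intro kv hkv
          by_cases hk : kv.1 = pid
          · have h2 : kv.2 = pl := hkey kv hkv hk
            simp [pvF, hk, h2, hnew, hlt]
          · simp [hk]

theorem pvInv_fold (l : List (List (String × String)))
    (g : PySem.Dict String (List (List (String × String))))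
    (b : PySem.Dict String (List (String × String)))
    (h : pvInv g b) : pvInv (l.foldl pvStepA g) (l.foldl pvStepB b) := by
  induction l generalizing g b with
  | nil => exact h
  | cons a t ih => exact ih _ _ (pvInv_step g b a h)

-- A's selection loop, when every grouped list is nonempty, maps pvMF over the values
theorem pvSelect_loop (items : List (String × List (List (String × String))))
    (h : ∀ kv ∈ items, kv.2 ≠ []) (acc : List (List (String × String))) :
    items.foldl (fun repaired kv =>
      if kv.2.length = 1 then repaired ++ [kv.2.headI]
      else
        match PySem.List.min? kv.2 pvTs with
        | none => repaired
        | some best_assignment => repaired ++ [best_assignment]) acc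
    = acc ++ items.map (fun kv => pvMF kv.2) := by
  induction items generalizing acc with
  | nil => simp
  | cons kv t ih =>
    rw [List.foldl_cons, List.map_cons]
    have hstep : (if kv.2.length = 1 then acc ++ [kv.2.headI]
      else
        match PySem.List.min? kv.2 pvTs with
        | none => acc
        | some best_assignment => acc ++ [best_assignment]) = acc ++ [pvMF kv.2] := by
      by_cases h1 : kv.2.length = 1
      · rw [if_pos h1]
        obtain ⟨x, hx⟩ := List.length_eq_one_iff.1 h1
        rw [hx]; rfl
      · rw [if_neg h1]
        cases hm : PySem.List.min? kv.2 pvTs with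
        | none =>
          exact absurd ((PySem.List.min?_eq_none_iff (xs := kv.2) (key := pvTs)).1 hm)
            (h kv (List.mem_cons_self))
        | some m => unfold pvMF; rw [hm]; rfl
    rw [hstep, ih (fun kv hkv => h kv (List.mem_cons_of_mem _ hkv))]
    simp

-- ===== VERDICT (by name: the statement is the Claim_ definition above) =====
theorem repair_duplicates_genetic_local_search_py_spec : Claim_equal_repair_duplicates_genetic_local_search_py := by
  intro assignments _
  unfold Spec_repair_duplicates_genetic_local_search_py
  unfold repair_duplicates_genetic_local_search_py repair_duplicates_genetic_local_search_py_alt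
  have hA : (fun (d : PySem.Dict String (List (List (String × String)))) assignment =>
      match pvGet assignment "project_id" with
      | none => d
      | some project_id =>
          if project_id = "" then d else d.modify project_id [] (· ++ [assignment])) = pvStepA := rfl
  have hB : (fun (best : PySem.Dict String (List (String × String))) assignment =>
      match pvGet assignment "project_id" with
      | none => best
      | some project_id =>
          if project_id = "" then best
          else
            match best.get? project_id with
            | none => best.insert project_id assignment
            | some current =>
                if pvTs assignment < pvTs current then best.insert project_id assignment
                else best) = pvStepB := rfl
  rw [hA, hB]
  have hinv : pvInv (assignments.foldl pvStepA PySem.Dict.empty)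
      (assignments.foldl pvStepB PySem.Dict.empty) :=
    pvInv_fold assignments _ _ ⟨by simp [PySem.Dict.empty], by simp [PySem.Dict.empty], rfl⟩
  obtain ⟨hnd, hne, hitems⟩ := hinv
  rw [pvSelect_loop _ hne []]
  rw [PySem.Dict.values, hitems, List.map_map]
  rfl
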